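-- pv_equiv track=rewrite | github.com/edge-core/sonic-buildimage | platform/barefoot/sonic-platform-modules-bfn-montara/sonic_platform/thermal.py | __sensors_chip_parsed
-- ===== SOURCE A (Python) =====
-- def __sensors_chip_parsed(data: str):
--     def kv(line):
--         k, v, *_ = [t.strip(': ') for t in line.split(':') if t] + ['']
--         return k, v
--
--     chip, *data = data.strip().split('\n')
--     chip = chip.strip(': ')
--
--     sensors = []
--     for line in data:
--         if not line.startswith(' '):
--             sensor_label = line.strip(': ')
--             sensors.append((sensor_label, {}))
--             continue
--
--         if len(sensors) == 0:
--             raise RuntimeError(f'invalid data to parse: {data}')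
--
--         attr, value = kv(line)
--         sensor_label, sensor_data = sensors[-1]
--         sensor_data.update({attr: value})
--
--     return chip, dict(sensors)
-- ===== SOURCE B (Python) =====
-- # B: walks the lines as alternating header/attribute runs via itertools.groupby instead of a per-line branch; objective: alternative decomposition.
-- from itertools import groupby
--
--
-- def __sensors_chip_parsed(data: str):
--     def kv(line):
--         k, v, *_ = [t.strip(': ') for t in line.split(':') if t] + ['']
--         return k, v
--
--     chip, *data = data.strip().split('\n')
--
--     sensors = []
--     for is_attr, run in groupby(data, key=lambda l: l.startswith(' ')):
--         if is_attr:
--             if not sensors: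
--                 raise RuntimeError(f'invalid data to parse: {data}')
--             sensors[-1][1].update(kv(l) for l in run)
--         else:
--             sensors.extend((l.strip(': '), {}) for l in run)
--
--     return chip.strip(': '), dict(sensors)
-- ===== Notes on version B (the rewrite author's own statement) =====
-- stated objective: alternative
-- what changed: Replaces A's per-line loop with its branch and sensors[-1] update by an itertools.groupby walk over maximal header/attribute runs: each header run extends the sensor list in one go and each attribute run is merged into the last sensor's dict with a single update.
import Mathlib
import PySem

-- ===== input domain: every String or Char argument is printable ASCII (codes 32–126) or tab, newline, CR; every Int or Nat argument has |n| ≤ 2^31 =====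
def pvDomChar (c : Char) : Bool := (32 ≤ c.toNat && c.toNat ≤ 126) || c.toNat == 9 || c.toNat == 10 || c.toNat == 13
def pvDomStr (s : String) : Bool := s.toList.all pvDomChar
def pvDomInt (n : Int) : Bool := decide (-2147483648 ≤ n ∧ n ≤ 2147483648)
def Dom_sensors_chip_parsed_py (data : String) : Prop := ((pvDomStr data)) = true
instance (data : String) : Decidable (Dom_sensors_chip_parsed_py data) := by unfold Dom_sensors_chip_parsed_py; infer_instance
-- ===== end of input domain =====

-- B re-decomposes A's per-line loop into alternating header/attribute runs (groupby); return value proved equal wherever A returns.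

-- ===== PORT A =====
-- s.split(sep) with the literal non-empty seps "\n" / ":" (split? is none only for sep = "")
def pvSplit (s : String) (sep : String) : List String := (PySem.Str.split? s sep).getD [s]

-- shared inner helper kv(line) of both Pythons
def pvKv (line : String) : String × String :=
  let toks := (((pvSplit line ":").filter (fun t => !(t == ""))).map
      (fun t => PySem.Str.stripChars t ": ")) ++ [""]
  (toks.headD "", (toks.drop 1).headD "")

-- dict(sensors): both Pythons' final dict() conversion (inner dicts rendered as their items lists)
def pvDictOf (pairs : List (String × PySem.Dict String String)) :
    List (String × List (String × String)) :=
  (pairs.foldl (fun d p => d.insert p.1 p.2) PySem.Dict.empty).items.map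
    (fun p => (p.1, PySem.Dict.items p.2))

-- A's loop body, one line at a time
def pvStepA (sensors : List (String × PySem.Dict String String)) (line : String) :
    List (String × PySem.Dict String String) :=
  if !(PySem.Str.startswith line " ") then
    sensors ++ [(PySem.Str.stripChars line ": ", PySem.Dict.empty)]
  else
    match sensors.getLast? with
    | none => sensors   -- Python raises RuntimeError here; excluded by Pre_
    | some (lbl, d) =>
      let p := pvKv line
      sensors.dropLast ++ [(lbl, d.insert p.1 p.2)]

def sensors_chip_parsed_py (data : String) : String × (List (String × List (String × String))) :=
  let lines := pvSplit (PySem.Str.strip data) "\n"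
  let chip := PySem.Str.stripChars (lines.headD "") ": "
  let sensors := lines.tail.foldl pvStepA []
  (chip, pvDictOf sensors)

-- ===== PORT B =====
-- itertools.groupby(data, key=startswith ' '): maximal runs of lines with equal key
def pvRuns (ls : List String) : List (Bool × List String) :=
  match ls with
  | [] => []
  | l :: rest =>
    let k := PySem.Str.startswith l " "
    (k, l :: rest.takeWhile (fun x => PySem.Str.startswith x " " == k)) ::
      pvRuns (rest.dropWhile (fun x => PySem.Str.startswith x " " == k))
termination_by ls.length
decreasing_by simpa using Nat.lt_succ_of_le (List.length_dropWhile_le _ _)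

-- B's loop body, one groupby run at a time
def pvStepB (sensors : List (String × PySem.Dict String String)) (run : Bool × List String) :
    List (String × PySem.Dict String String) :=
  if run.1 then
    match sensors.getLast? with
    | none => sensors   -- Python raises RuntimeError here; excluded by Pre_
    | some (lbl, d) => sensors.dropLast ++ [(lbl, d.update (run.2.map pvKv))]
  else
    sensors ++ run.2.map (fun l => (PySem.Str.stripChars l ": ", PySem.Dict.empty))

def sensors_chip_parsed_py_alt (data : String) : String × (List (String × List (String × String))) :=
  let lines := pvSplit (PySem.Str.strip data) "\n"
  let sensors := (pvRuns lines.tail).foldl pvStepB []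
  (PySem.Str.stripChars (lines.headD "") ": ", pvDictOf sensors)

-- ===== PRECONDITION & SPEC =====
-- Pre_ excludes exactly the inputs where Python A raises RuntimeError: the line right after the
-- chip line begins with a space, i.e. the first attribute line precedes any sensor header; B raises too.
def Pre_sensors_chip_parsed_py (data : String) : Prop :=
  PySem.Str.startswith (((pvSplit (PySem.Str.strip data) "\n").tail).headD "") " " = false
instance (data : String) : Decidable (Pre_sensors_chip_parsed_py data) := by
  unfold Pre_sensors_chip_parsed_py; infer_instance

def pvWitness_sensors_chip_parsed_py : String := "coretemp-isa:\ntemp1:\n  input: 40\ntemp2:"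

def Spec_sensors_chip_parsed_py (data : String) (out : String × (List (String × List (String × String)))) : Prop := out = sensors_chip_parsed_py_alt data
instance (data : String) (out : String × (List (String × List (String × String)))) : Decidable (Spec_sensors_chip_parsed_py data out) := by unfold Spec_sensors_chip_parsed_py; infer_instance

-- ===== CLAIM (what is proved, stated in full; the proofs are below) =====
def Claim_equal_sensors_chip_parsed_py : Prop := ∀ (data : String), Dom_sensors_chip_parsed_py data → Pre_sensors_chip_parsed_py data → Spec_sensors_chip_parsed_py data (sensors_chip_parsed_py data)

-- ===== LEMMAS AND PROOFS =====

theorem pv_header_run (run : List String) (h : ∀ l ∈ run, PySem.Str.startswith l " " = false)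
    (s : List (String × PySem.Dict String String)) :
    run.foldl pvStepA s = s ++ run.map (fun l => (PySem.Str.stripChars l ": ", PySem.Dict.empty)) := by
  induction run generalizing s with
  | nil => simp
  | cons l rest ih =>
    have hl : PySem.Chars.startswith l.toList [' '] = false := by simpa using h l (by simp)
    simp only [List.foldl_cons, List.map_cons]
    rw [ih (fun x hx => h x (by simp [hx]))]
    simp [pvStepA, hl]

theorem pv_attr_run (run : List String) (h : ∀ l ∈ run, PySem.Str.startswith l " " = true)
    (s : List (String × PySem.Dict String String)) (lbl : String) (d : PySem.Dict String String) :
    (run.foldl pvStepA (s ++ [(lbl, d)])) = s ++ [(lbl, d.update (run.map pvKv))] := by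
  induction run generalizing d with
  | nil => simp [PySem.Dict.update]
  | cons l rest ih =>
    have hl : PySem.Chars.startswith l.toList [' '] = true := by simpa using h l (by simp)
    simp only [List.foldl_cons, List.map_cons]
    have hstep : pvStepA (s ++ [(lbl, d)]) l
        = s ++ [(lbl, d.insert (pvKv l).1 (pvKv l).2)] := by
      simp [pvStepA, hl]
    rw [hstep, ih (fun x hx => h x (by simp [hx]))]
    simp [PySem.Dict.update]

theorem pv_attr_run_nil (run : List String)
    (h : ∀ l ∈ run, PySem.Str.startswith l " " = true) :
    run.foldl pvStepA ([] : List (String × PySem.Dict String String)) = [] := by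
  induction run with
  | nil => rfl
  | cons l rest ih =>
    have hl : PySem.Chars.startswith l.toList [' '] = true := by simpa using h l (by simp)
    simp only [List.foldl_cons]
    have : pvStepA [] l = [] := by simp [pvStepA, hl]
    rw [this]; exact ih (fun x hx => h x (by simp [hx]))

theorem pv_run_step (k : Bool) (l : String) (run : List String)
    (hl : PySem.Str.startswith l " " = k)
    (hrun : ∀ x ∈ run, PySem.Str.startswith x " " = k)
    (s : List (String × PySem.Dict String String)) :
    pvStepB s (k, l :: run) = (l :: run).foldl pvStepA s := by
  have hmem : ∀ x ∈ l :: run, PySem.Str.startswith x " " = k := by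
    intro x hx
    rcases List.mem_cons.mp hx with h1 | h2
    · rw [h1, hl]
    · exact hrun x h2
  cases k with
  | false =>
    rw [pv_header_run _ hmem s]
    simp [pvStepB]
  | true =>
    rw [pvStepB]
    match hs : s.getLast? with
    | none =>
      have hsnil : s = [] := by
        cases s with
        | nil => rfl
        | cons a t => simp [List.getLast?_eq_some_getLast] at hs
      subst hsnil
      exact (pv_attr_run_nil _ hmem).symm
    | some p =>
      obtain ⟨s₀, hs₀⟩ : ∃ s₀, s = s₀ ++ [p] := List.getLast?_eq_some_iff.mp hs
      subst hs₀
      rw [pv_attr_run _ hmem s₀ p.1 p.2]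
      simp

theorem pv_fold_eq_aux : ∀ (n : Nat) (ls : List String), ls.length ≤ n →
    ∀ (s : List (String × PySem.Dict String String)),
    (pvRuns ls).foldl pvStepB s = ls.foldl pvStepA s := by
  intro n
  induction n with
  | zero =>
    intro ls h s
    have : ls = [] := List.eq_nil_of_length_eq_zero (Nat.le_zero.mp h)
    subst this; simp [pvRuns]
  | succ n ih =>
    intro ls h s
    match ls with
    | [] => simp [pvRuns]
    | l :: rest =>
      have hmem : ∀ x ∈ rest.takeWhile (fun x => PySem.Str.startswith x " " == PySem.Str.startswith l " "),
          PySem.Str.startswith x " " = PySem.Str.startswith l " " :=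
        fun x hx => by simpa using List.mem_takeWhile_imp hx
      have hlen : (rest.dropWhile (fun x => PySem.Str.startswith x " " == PySem.Str.startswith l " ")).length ≤ n := by
        have := List.length_dropWhile_le (fun x => PySem.Str.startswith x " " == PySem.Str.startswith l " ") rest
        simp only [List.length_cons] at h; omega
      rw [pvRuns]
      rw [List.foldl_cons, pv_run_step (PySem.Str.startswith l " ") l _ rfl hmem s,
          ih _ hlen, ← List.foldl_append, List.cons_append, List.takeWhile_append_dropWhile]

-- ===== VERDICT (by name: the statement is the Claim_ definition above) =====
theorem sensors_chip_parsed_py_spec : Claim_equal_sensors_chip_parsed_py := by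
  intro data _ _
  unfold Spec_sensors_chip_parsed_py
  simp only [sensors_chip_parsed_py, sensors_chip_parsed_py_alt]
  rw [pv_fold_eq_aux (pvSplit (PySem.Str.strip data) "\n").tail.length _ le_rfl]
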